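-- pv_equiv track=rewrite | github.com/OTOYO1020/ChatDev_Intermediate | WareHouse/ED_260__20250518035909/good_sequences.py | count_good_sequences
-- ===== SOURCE A (Python) =====
-- from typing import List, Tuple
--
-- def count_good_sequences(M: int, pairs: List[Tuple[int, int]]) -> List[int]:
--     '''
--     Count good sequences of lengths from 1 to M based on the provided pairs.
--     Parameters:
--     M (int): The maximum integer defining the length of sequences.
--     pairs (List[Tuple[int, int]]): A list of tuples containing pairs of integers.
--     Returns:
--     List[int]: A list containing the counts of good sequences for each length from 1 to M.
--     '''
--     f = [0] * M  # Initialize the list to store counts of good sequences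
--     valid_set = set()  # Set to store valid integers from pairs
--     # Populate the valid_set with all integers from pairs
--     for a, b in pairs:
--         valid_set.add(a)
--         valid_set.add(b)
--     for k in range(1, M + 1):  # Iterate through lengths from 1 to M
--         count = 0
--         # Generate all contiguous subsequences of length k
--         for start in range(1, M - k + 2):  # Start of the subsequence (1 to M-k+1)
--             end = start + k - 1  # End of the subsequence
--             # Create the actual subsequence using the range of integers
--             subsequence = set(range(1, M + 1)[start - 1:end])  # Corrected line
--             # Check if the subsequence contains at least one of the integers from each pair
--             if all(any(x in subsequence for x in pair) for pair in pairs):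
--                 count += 1
--         f[k - 1] = count  # Store the count for length k
--     return f
-- ===== SOURCE B (Python) =====
-- from typing import List, Tuple
--
-- def count_good_sequences(M: int, pairs: List[Tuple[int, int]]) -> List[int]:
--     # Loop order swapped: for each start s compute once the smallest window
--     # length lo(s) that already satisfies every pair (windows are nested in k,
--     # so [s, s+k-1] is good exactly for lo(s) <= k <= M-s+1); then count, per
--     # length k, the start-intervals containing k.  No window set is built.
--     intervals = []
--     for s in range(1, M + 1):
--         lo = 1
--         for a, b in pairs:
--             best = M - s + 2  # sentinel: no feasible length from this start
--             if s <= a <= M: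
--                 best = a - s + 1
--             if s <= b <= M:
--                 best = min(best, b - s + 1)
--             lo = max(lo, best)
--         intervals.append((lo, M - s + 1))
--     return [sum(1 for lo, hi in intervals if lo <= k <= hi) for k in range(1, M + 1)]
-- ===== Notes on version B (the rewrite author's own statement) =====
-- stated objective: faster
-- what changed: B swaps the loop order: instead of materializing every window as a set and re-checking all pairs for each (length, start), it computes once per start the minimal good window length lo(s) (windows are nested in k), then counts per length the start-intervals [lo(s), M-s+1] containing it.
import Mathlib
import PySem

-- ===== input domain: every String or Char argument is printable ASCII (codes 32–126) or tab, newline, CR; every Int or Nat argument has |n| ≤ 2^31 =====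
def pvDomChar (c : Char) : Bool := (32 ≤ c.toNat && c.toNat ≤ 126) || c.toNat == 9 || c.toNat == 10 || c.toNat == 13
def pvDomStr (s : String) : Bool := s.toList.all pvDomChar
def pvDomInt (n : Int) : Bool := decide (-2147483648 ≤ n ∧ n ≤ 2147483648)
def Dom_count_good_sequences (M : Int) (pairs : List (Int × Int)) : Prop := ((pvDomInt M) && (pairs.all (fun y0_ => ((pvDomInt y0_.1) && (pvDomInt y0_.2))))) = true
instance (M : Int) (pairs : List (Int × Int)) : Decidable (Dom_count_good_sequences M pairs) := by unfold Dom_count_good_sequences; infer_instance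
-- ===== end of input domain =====

-- B replaces A's per-(length,start) window-set rebuild and all-pairs re-check by a per-start
-- minimal-good-length computation followed by interval counting (objective: faster).

-- ===== PORT A =====
def count_good_sequences (M : Int) (pairs : List (Int × Int)) : List Int :=
  let f : List Int := PySem.List.pyRepeat [0] M
  -- valid_set is built (and, as in A, never used)
  let _valid_set : PySem.Set Int :=
    pairs.foldl (fun vs ab => PySem.Set.add (PySem.Set.add vs ab.1) ab.2) PySem.Set.empty
  (PySem.List.pyRange 1 (M + 1)).foldl (fun f k =>
    let count : Int :=
      (PySem.List.pyRange 1 (M - k + 2)).foldl (fun count start =>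
        let e := start + k - 1
        let subsequence : PySem.Set Int :=
          PySem.Set.ofList (PySem.List.slice (PySem.List.pyRange 1 (M + 1)) (some (start - 1)) (some e))
        if pairs.all (fun pair => [pair.1, pair.2].any (fun x => subsequence.contains x))
        then count + 1 else count) 0
    f.set (k - 1).toNat count) f

-- ===== PORT B =====
-- the inner per-start loop of Source B, as a helper
def pvLow (M s : Int) (pairs : List (Int × Int)) : Int :=
  pairs.foldl (fun lo ab =>
    let best : Int := M - s + 2
    let best : Int := if s ≤ ab.1 ∧ ab.1 ≤ M then ab.1 - s + 1 else best
    let best : Int := if s ≤ ab.2 ∧ ab.2 ≤ M then min best (ab.2 - s + 1) else best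
    max lo best) 1

def count_good_sequences_alt (M : Int) (pairs : List (Int × Int)) : List Int :=
  let intervals : List (Int × Int) :=
    (PySem.List.pyRange 1 (M + 1)).foldl (fun acc s =>
      acc ++ [(pvLow M s pairs, M - s + 1)]) []
  (PySem.List.pyRange 1 (M + 1)).map (fun k =>
    intervals.foldl (fun acc lh => if lh.1 ≤ k ∧ k ≤ lh.2 then acc + 1 else acc) 0)

-- ===== PRECONDITION & SPEC =====
def Spec_count_good_sequences (M : Int) (pairs : List (Int × Int)) (out : List Int) : Prop := out = count_good_sequences_alt M pairs
instance (M : Int) (pairs : List (Int × Int)) (out : List Int) : Decidable (Spec_count_good_sequences M pairs out) := by unfold Spec_count_good_sequences; infer_instance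

-- ===== CLAIM (what is proved, stated in full; the proofs are below) =====
def Claim_equal_count_good_sequences : Prop := ∀ (M : Int) (pairs : List (Int × Int)), Dom_count_good_sequences M pairs → Spec_count_good_sequences M pairs (count_good_sequences M pairs)

-- ===== LEMMAS AND PROOFS =====

lemma pyRange_nil {a b : Int} (h : b ≤ a) : PySem.List.pyRange a b = [] := by
  have := PySem.List.length_pyRange_one a b
  have : (PySem.List.pyRange a b).length = 0 := by omega
  exact List.eq_nil_of_length_eq_zero this

lemma take_set (f : List Int) (a : Nat) (v : Int) (h : a < f.length) :
    (f.set a v).take (a+1) = f.take a ++ [v] := by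
  apply List.ext_getElem
  · simp; omega
  · intro i h1 h2
    simp [List.getElem_set, List.getElem_append, List.getElem_take]
    split_ifs with h3 h4 <;> simp_all <;> omega

lemma set_fold (g : Int → Int) : ∀ (n : Nat) (a : Int) (f : List Int), 0 ≤ a → f.length = a.toNat + n →
    (PySem.List.pyRange (a+1) (a+1+(n:Int))).foldl (fun f k => f.set (k-1).toNat (g k)) f
    = f.take a.toNat ++ (PySem.List.pyRange (a+1) (a+1+(n:Int))).map g := by
  intro n
  induction n with
  | zero =>
    intro a f ha hf
    rw [pyRange_nil (by omega), List.take_of_length_le (by omega : f.length ≤ a.toNat)]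
    simp
  | succ n ih =>
    intro a f ha hf
    rw [PySem.List.pyRange_one_cons (by push_cast; omega)]
    rw [List.foldl_cons, List.map_cons]
    have h1 : (a + 1 - 1).toNat = a.toNat := by omega
    have h2 : a + 1 + ((n:Nat)+1 : Nat) = (a+1) + 1 + (n:Int) := by push_cast; ring
    rw [h1, h2, ih (a+1) _ (by omega) (by simp; omega)]
    rw [show (a+1).toNat = a.toNat + 1 by omega, take_set _ _ _ (by omega)]
    simp
lemma slice_range (M s k : Int) (hs : 1 ≤ s) (hk : 1 ≤ k) (hM : s + k - 1 ≤ M) :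
    PySem.List.slice (PySem.List.pyRange 1 (M+1)) (some (s-1)) (some (s+k-1))
    = PySem.List.pyRange s (s+k) := by
  rw [show s - 1 = (((s-1).toNat : Nat) : Int) by omega,
      show s + k - 1 = (((s+k-1).toNat : Nat) : Int) by omega,
      PySem.List.slice_natCast]
  rw [PySem.List.pyRange_one_append 1 s (M+1) (by omega) (by omega),
      PySem.List.pyRange_one_append s (s+k) (M+1) (by omega) (by omega)]
  rw [List.drop_left' (by simp only [PySem.List.length_pyRange_one])]
  rw [List.take_left' (by simp only [PySem.List.length_pyRange_one]; omega)]

lemma foldl_max_le_iff (g : Int × Int → Int) (l : List (Int × Int)) (c : Int) :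
    ∀ init : Int, (l.foldl (fun acc x => max acc (g x)) init ≤ c ↔ init ≤ c ∧ ∀ x ∈ l, g x ≤ c) := by
  induction l with
  | nil => intro init; simp
  | cons h t ih =>
    intro init
    rw [List.foldl_cons, ih]
    simp only [List.mem_cons]
    constructor
    · rintro ⟨h1, h2⟩
      exact ⟨by omega, fun x hx => hx.elim (fun e => e ▸ by omega) (h2 x)⟩
    · rintro ⟨h1, h2⟩
      exact ⟨by have := h2 h (Or.inl rfl); omega, fun x hx => h2 x (Or.inr hx)⟩

lemma low_le_iff (M s k : Int) (pairs : List (Int × Int)) (hk : k ≤ M - s + 1) :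
    pvLow M s pairs ≤ k ↔ 1 ≤ k ∧ ∀ p ∈ pairs,
      ((s ≤ p.1 ∧ p.1 < s + k) ∨ (s ≤ p.2 ∧ p.2 < s + k)) := by
  unfold pvLow
  rw [foldl_max_le_iff (g := fun ab =>
    if s ≤ ab.2 ∧ ab.2 ≤ M then
      min (if s ≤ ab.1 ∧ ab.1 ≤ M then ab.1 - s + 1 else M - s + 2) (ab.2 - s + 1)
    else if s ≤ ab.1 ∧ ab.1 ≤ M then ab.1 - s + 1 else M - s + 2)]
  constructor
  · rintro ⟨h1, h2⟩
    refine ⟨h1, fun p hp => ?_⟩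
    have := h2 p hp
    split_ifs at this <;> (try simp only [min_le_iff] at this) <;> omega
  · rintro ⟨h1, h2⟩
    refine ⟨h1, fun p hp => ?_⟩
    have := h2 p hp
    split_ifs <;> (try simp only [min_le_iff]) <;> omega

-- ===== VERDICT (by name: the statement is the Claim_ definition above) =====
theorem count_good_sequences_spec : Claim_equal_count_good_sequences := by
  intro M pairs _
  unfold Spec_count_good_sequences count_good_sequences count_good_sequences_alt
  by_cases hM : M ≤ 0
  · rw [pyRange_nil (by omega)]
    simp [PySem.List.pyRepeat_singleton, Int.toNat_of_nonpos hM]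
  · rw [not_le] at hM
    have hsf := set_fold (fun k =>
        (PySem.List.pyRange 1 (M - k + 2)).foldl (fun count start =>
          if (pairs.all fun pair => [pair.1, pair.2].any fun x =>
              (PySem.Set.ofList (PySem.List.slice (PySem.List.pyRange 1 (M+1))
                (some (start - 1)) (some (start + k - 1)))).contains x) = true
          then count + 1 else count) 0)
      M.toNat 0 (PySem.List.pyRepeat [0] M) (by norm_num)
      (by simp [PySem.List.pyRepeat_singleton])
    rw [show ((0:Int) + 1) = 1 by norm_num] at hsf
    rw [show (1:Int) + (M.toNat : Int) = M + 1 by omega] at hsf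
    rw [hsf]
    rw [PySem.List.foldl_append_singleton_eq_map (f := fun s => (pvLow M s pairs, M - s + 1))]
    simp only [Int.toNat_zero, List.take_zero, List.nil_append]
    apply List.map_congr_left
    intro k hk
    rw [PySem.List.mem_pyRange_one] at hk
    rw [PySem.List.foldl_if_add_one, PySem.List.foldl_ite_add_one (p := fun lh : Int × Int => lh.1 ≤ k ∧ k ≤ lh.2)]
    simp only [zero_add, List.countP_map]
    norm_cast
    conv_rhs => rw [PySem.List.pyRange_one_append 1 (M-k+2) (M+1) (by omega) (by omega)]
    rw [List.countP_append]
    have hzero : List.countP ((fun lh : Int × Int => decide (lh.1 ≤ k ∧ k ≤ lh.2)) ∘ fun s => (pvLow M s pairs, M - s + 1)) (PySem.List.pyRange (M-k+2) (M+1)) = 0 := by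
      rw [List.countP_eq_zero]
      intro s hs
      rw [PySem.List.mem_pyRange_one] at hs
      simp only [Function.comp_apply, decide_eq_true_eq, not_and]
      intro _
      omega
    rw [hzero, Nat.add_zero]
    apply List.countP_congr
    intro s hs
    rw [PySem.List.mem_pyRange_one] at hs
    rw [slice_range M s k (by omega) (by omega) (by omega)]
    simp only [Function.comp_apply, decide_eq_true_eq, List.all_eq_true, List.any_eq_true,
      List.mem_cons, List.not_mem_nil, or_false, PySem.Set.contains, List.contains_iff_mem,
      PySem.Set.mem_ofList, PySem.List.mem_pyRange_one]
    rw [low_le_iff M s k pairs (by omega)]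
    constructor
    · intro h
      refine ⟨⟨by omega, fun p hp => ?_⟩, by omega⟩
      obtain ⟨x, hx, hx2⟩ := h p hp
      rcases hx with rfl | rfl <;> [left; right] <;> omega
    · rintro ⟨⟨-, h2⟩, -⟩
      intro p hp
      rcases h2 p hp with h | h
      · exact ⟨p.1, Or.inl rfl, by omega⟩
      · exact ⟨p.2, Or.inr rfl, by omega⟩
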